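-- pv_equiv track=rewrite | github.com/gercoweststeijn/adventsofcode2023 | 011/main.py | expand_m
-- ===== SOURCE A (Python) =====
-- def expand_m (universe):
--     # rows
--     U = []
--     ER = []
--     for ul in universe:
--         if ('#' in ul):
--             U.append(ul)
--         else:
--             U.append(['M']*(len(ul)))
--
--     # collumns
--     # transpose
--     U = list(map(list, zip(*U)))
--     U2 = []
--     for ul in U:
--         if ('#' in ul):
--             U2.append(ul)
--         else:
--             U2.append(['M']*(len(ul)))
--     # transpose back to roiginal
--     U = list(map(list, zip(*U2)))
--
--     return U
-- ===== SOURCE B (Python) =====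
-- def expand_m(universe):
--     # one scan: marker vector of '#'-free columns, then a single output pass
--     width = len(universe[0]) if universe else 0
--     empty_cols = [True] * width
--     for row in universe:
--         empty_cols = [e and c != '#' for e, c in zip(empty_cols, row)]
--     out = []
--     for row in universe:
--         row_empty = '#' not in row
--         out.append(['M' if row_empty or ce else c for c, ce in zip(row, empty_cols)])
--     return out
-- ===== Notes on version B (the rewrite author's own statement) =====
-- stated objective: alternative
-- what changed: replaces A's mark-rows / transpose / mark-rows / transpose-back pipeline by one scan that folds an empty-column boolean marker vector and a single output pass emitting 'M' where the row or the column is '#'-free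
-- outside the precondition, e.g. on expand_m([[]]): A returns [], B returns [[]]; on expand_m([['#'], []]): A returns [], B returns [[], []]
import Mathlib
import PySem

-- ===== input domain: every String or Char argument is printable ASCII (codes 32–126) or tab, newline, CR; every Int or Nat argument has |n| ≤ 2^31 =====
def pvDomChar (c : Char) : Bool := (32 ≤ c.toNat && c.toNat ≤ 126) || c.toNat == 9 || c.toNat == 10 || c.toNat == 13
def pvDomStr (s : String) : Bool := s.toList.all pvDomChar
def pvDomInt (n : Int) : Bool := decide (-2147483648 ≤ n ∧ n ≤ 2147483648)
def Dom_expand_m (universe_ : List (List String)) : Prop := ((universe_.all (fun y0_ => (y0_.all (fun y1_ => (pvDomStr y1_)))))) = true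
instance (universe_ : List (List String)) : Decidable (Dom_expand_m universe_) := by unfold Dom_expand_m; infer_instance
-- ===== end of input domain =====

-- B replaces A's mark/transpose/mark/transpose pipeline by one empty-column marker scan and
-- a single output pass (alternative decomposition, same asymptotic cost); Pre_ excludes the
-- degenerate grids that contain a zero-width row (see the sentence above Pre_expand_m).


-- ===== PORT A =====
-- A's row-marking loop: append the row, or a row of 'M's of the same length, to an accumulator
def markRows (X : List (List String)) : List (List String) :=
  X.foldl (fun U ul => U ++ [if ul.contains "#" then ul else List.replicate ul.length "M"]) []

-- hand port of Python's `list(map(list, zip(*U)))` (PySem has no zip(*...)): exact — zipping the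
-- rows as iterators yields min-row-length many tuples, tuple j holding every row's element j
def pyZipT (U : List (List String)) : List (List String) :=
  match U with
  | [] => []
  | u :: us =>
    let n := us.foldl (fun m r => min m r.length) u.length
    (List.range n).map (fun j => (u :: us).map (fun r => r.getD j ""))

def expand_m (universe_ : List (List String)) : List (List String) :=
  pyZipT (markRows (pyZipT (markRows universe_)))

-- ===== PORT B =====
def expand_m_alt (universe_ : List (List String)) : List (List String) :=
  let width := match universe_ with | [] => 0 | r :: _ => r.length
  let emptyCols := universe_.foldl
    (fun ec row => (ec.zip row).map (fun p => p.1 && !(p.2 == "#")))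
    (List.replicate width true)
  universe_.map (fun row =>
    let rowEmpty := !(row.contains "#")
    (row.zip emptyCols).map (fun p => if rowEmpty || p.2 then "M" else p.1))

-- ===== PRECONDITION & SPEC =====
-- Pre_ excludes grids containing a zero-width row: such a grid is degenerate (every row gets
-- truncated to width 0 by transposition), and whether the result is the empty grid (A) or one
-- zero-width row per input row (B) is an unspecified corner on which either value is defensible.
def Pre_expand_m (universe_ : List (List String)) : Prop := ∀ r ∈ universe_, r ≠ []
instance (universe_ : List (List String)) : Decidable (Pre_expand_m universe_) := by unfold Pre_expand_m; infer_instance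

def pvWitness_expand_m : List (List String) := [[".", "#"], [".", "."]]

def Spec_expand_m (universe_ : List (List String)) (out : List (List String)) : Prop := out = expand_m_alt universe_
instance (universe_ : List (List String)) (out : List (List String)) : Decidable (Spec_expand_m universe_ out) := by unfold Spec_expand_m; infer_instance

-- ===== CLAIM (what is proved, stated in full; the proofs are below) =====
def Claim_equal_expand_m : Prop := ∀ (universe_ : List (List String)), Dom_expand_m universe_ → Pre_expand_m universe_ → Spec_expand_m universe_ (expand_m universe_)

-- ===== LEMMAS AND PROOFS =====

def mrow (ul : List String) : List String :=
  if ul.contains "#" then ul else List.replicate ul.length "M"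

theorem markRows_eq_map (X : List (List String)) : markRows X = X.map mrow := by
  suffices h : ∀ acc : List (List String), X.foldl
      (fun U ul => U ++ [if ul.contains "#" then ul else List.replicate ul.length "M"]) acc = acc ++ X.map mrow by
    simpa [markRows] using h []
  induction X with
  | nil => intro acc; simp
  | cons x xs ih => intro acc; rw [List.foldl_cons, ih]; simp [mrow]

theorem mrow_length (ul : List String) : (mrow ul).length = ul.length := by
  unfold mrow; split <;> simp

-- mrow pointwise, at an in-range index
theorem mrow_getD (r : List String) (j : Nat) (hj : j < r.length) :
    (mrow r).getD j "" = if r.contains "#" then r.getD j "" else "M" := by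
  unfold mrow
  by_cases hc : r.contains "#" = true
  · rw [if_pos hc, if_pos hc]
  · rw [if_neg hc, if_neg hc]
    rw [List.getD_eq_getElem _ _ (by simpa using hj : j < (List.replicate r.length "M").length)]
    simp

-- a cell equal to "#" forces its row to contain "#"
theorem mrow_getD_hash (r : List String) (j : Nat) (hj : j < r.length) :
    ((mrow r).getD j "" = "#") ↔ (r.getD j "" = "#") := by
  rw [mrow_getD r j hj]
  by_cases hc : r.contains "#" = true
  · rw [if_pos hc]
  · rw [if_neg hc]
    constructor
    · intro h; exact absurd h (by decide)
    · intro h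
      exfalso
      apply hc
      rw [List.contains_iff_mem]
      rw [List.getD_eq_getElem _ _ hj] at h
      exact h ▸ List.getElem_mem hj

-- min-fold over lengths
theorem minfold_le_init (ls : List Nat) (a : Nat) : ls.foldl min a ≤ a := by
  induction ls generalizing a with
  | nil => simp
  | cons x xs ih => exact le_trans (ih (min a x)) (by omega)

theorem minfold_le_mem (ls : List Nat) (a : Nat) (x : Nat) (hx : x ∈ ls) : ls.foldl min a ≤ x := by
  induction ls generalizing a with
  | nil => cases hx
  | cons y ys ih =>
    rcases List.mem_cons.mp hx with rfl | h
    · exact le_trans (minfold_le_init ys (min a x)) (by omega)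
    · exact ih (min a y) h

theorem minfold_const (ls : List Nat) (a : Nat) (h : ∀ x ∈ ls, x = a) : ls.foldl min a = a := by
  induction ls with
  | nil => rfl
  | cons x xs ih =>
    have hx : x = a := h x (by simp)
    subst hx
    simp only [List.foldl_cons, min_self]
    exact ih (fun y hy => h y (by simp [hy]))

theorem minfold_pos (ls : List Nat) (a : Nat) (ha : 0 < a) (h : ∀ x ∈ ls, 0 < x) :
    0 < ls.foldl min a := by
  induction ls generalizing a with
  | nil => simpa
  | cons x xs ih =>
    exact ih (min a x) (by have := h x (by simp); omega) (fun y hy => h y (by simp [hy]))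

-- row min-fold only depends on the lengths
theorem rowfold_eq (rows : List (List String)) (a : Nat) :
    rows.foldl (fun m r => min m r.length) a = (rows.map List.length).foldl min a := by
  simp [List.foldl_map]

-- pyZipT of a nonempty list of rows all of length h
theorem pyZipT_const (U : List (List String)) (h : Nat) (hU : U ≠ [])
    (hlen : ∀ r ∈ U, r.length = h) :
    pyZipT U = (List.range h).map (fun i => U.map (fun r => r.getD i "")) := by
  cases U with
  | nil => exact absurd rfl hU
  | cons u us =>
    have hu : u.length = h := hlen u (by simp)
    have : us.foldl (fun m r => min m r.length) u.length = h := by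
      rw [rowfold_eq, hu]
      exact minfold_const _ _ (by intro x hx; rcases List.mem_map.mp hx with ⟨r, hr, rfl⟩; exact hlen r (by simp [hr]))
    simp only [pyZipT, this]

-- the empty-column fold: length and pointwise value
theorem ecFold_len (rows : List (List String)) (ec : List Bool) :
    (rows.foldl (fun ec row => (ec.zip row).map (fun p => p.1 && !(p.2 == "#"))) ec).length
      = (rows.map List.length).foldl min ec.length := by
  induction rows generalizing ec with
  | nil => rfl
  | cons r rs ih => simp [List.foldl_cons, ih]

theorem ecFold_getD (rows : List (List String)) (ec : List Bool) (j : Nat)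
    (hj : j < (rows.foldl (fun ec row => (ec.zip row).map (fun p => p.1 && !(p.2 == "#"))) ec).length) :
    (rows.foldl (fun ec row => (ec.zip row).map (fun p => p.1 && !(p.2 == "#"))) ec).getD j false
      = (ec.getD j false && rows.all (fun r => !(r.getD j "" == "#"))) := by
  induction rows generalizing ec with
  | nil => simp
  | cons r rs ih =>
    simp only [List.foldl_cons] at hj ⊢
    have hlen : j < ((ec.zip r).map (fun p => p.1 && !(p.2 == "#"))).length := by
      have heq := ecFold_len rs ((ec.zip r).map (fun p => p.1 && !(p.2 == "#")))
      have hle := minfold_le_init ((rs.map List.length)) ((ec.zip r).map (fun p => p.1 && !(p.2 == "#"))).length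
      omega
    have hjz : j < (ec.zip r).length := by simpa using hlen
    have hje : j < ec.length := by simp [List.length_zip] at hjz; omega
    have hjr : j < r.length := by simp [List.length_zip] at hjz; omega
    rw [ih _ hj, List.all_cons]
    rw [List.getD_eq_getElem _ _ hlen, List.getD_eq_getElem _ _ hje, List.getD_eq_getElem _ _ hjr]
    simp only [List.getElem_map, List.getElem_zip]
    rw [Bool.and_assoc]

-- all-of-negations versus any
theorem all_not_eq_not_any (l : List (List String)) (p : List String → Bool) :
    l.all (fun r => !(p r)) = !(l.any p) := by
  induction l with
  | nil => rfl
  | cons x xs ih => simp [ih]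

-- the key pointwise computation, per nonempty grid
theorem expand_m_main (u : List String) (us : List (List String))
    (hne : ∀ r ∈ u :: us, r ≠ []) :
    expand_m (u :: us) = expand_m_alt (u :: us) := by
  have hpos : ∀ r ∈ u :: us, 0 < r.length := by
    intro r hr
    cases r with
    | nil => exact absurd rfl (hne [] hr)
    | cons a l => simp
  -- the common column count n = min row length
  set n : Nat := (us.map List.length).foldl min u.length with hn_def
  have hnle : ∀ r ∈ u :: us, n ≤ r.length := by
    intro r hr
    rcases List.mem_cons.mp hr with rfl | hmem
    · exact minfold_le_init _ _
    · exact minfold_le_mem _ _ _ (List.mem_map.mpr ⟨r, hmem, rfl⟩)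
  have hnpos : 0 < n := by
    refine minfold_pos _ _ (hpos u (by simp)) ?_
    intro x hx
    rcases List.mem_map.mp hx with ⟨r, hr, rfl⟩
    exact hpos r (by simp [hr])
  -- A side: the first transpose
  have hmlen : ∀ X : List (List String), (X.map mrow).map List.length = X.map List.length := by
    intro X; simp [List.map_map, Function.comp_def, mrow_length]
  have hT1 : pyZipT (markRows (u :: us)) =
      (List.range n).map (fun j => ((u :: us).map mrow).map (fun r => r.getD j "")) := by
    rw [markRows_eq_map, List.map_cons]
    have hfold : (us.map mrow).foldl (fun m r => min m r.length) (mrow u).length = n := by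
      rw [rowfold_eq, hmlen, mrow_length]
    simp only [pyZipT, hfold, List.map_cons]
  -- the marked transpose: every row has length (u :: us).length
  have hcoljlen : ∀ j : Nat, (((u :: us).map mrow).map (fun r => r.getD j "")).length = (u :: us).length := by
    intro j; simp
  have hA2 : markRows (pyZipT (markRows (u :: us))) =
      (List.range n).map (fun j => mrow (((u :: us).map mrow).map (fun r => r.getD j ""))) := by
    rw [hT1, markRows_eq_map, List.map_map]
    simp [Function.comp_def]
  have hres : expand_m (u :: us) =
      (List.range (u :: us).length).map (fun i =>
        ((List.range n).map (fun j => mrow (((u :: us).map mrow).map (fun r => r.getD j "")))).map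
          (fun r => r.getD i "")) := by
    show pyZipT (markRows (pyZipT (markRows (u :: us)))) = _
    rw [hA2]
    apply pyZipT_const
    · have : 0 < ((List.range n).map (fun j => mrow (((u :: us).map mrow).map (fun r => r.getD j "")))).length := by
        simpa using hnpos
      intro hcon
      rw [hcon] at this
      simp at this
    · intro r hr
      rcases List.mem_map.mp hr with ⟨j, _, rfl⟩
      rw [mrow_length, hcoljlen]
  -- B side: the empty-column marker vector
  set ec : List Bool := (u :: us).foldl
    (fun ec row => (ec.zip row).map (fun p => p.1 && !(p.2 == "#")))
    (List.replicate u.length true) with hec_def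
  have hec_len : ec.length = n := by
    rw [hec_def, ecFold_len]
    simp only [List.map_cons, List.foldl_cons, List.length_replicate, min_self]
    rw [hn_def]
  have hec_get : ∀ j : Nat, j < n →
      ec.getD j false = (u :: us).all (fun r => !(r.getD j "" == "#")) := by
    intro j hj
    rw [hec_def, ecFold_getD _ _ j (by rw [← hec_def, hec_len]; exact hj)]
    have hju : j < u.length := lt_of_lt_of_le hj (hnle u (by simp))
    rw [List.getD_eq_getElem _ _ (by simpa using hju : j < (List.replicate u.length (true : Bool)).length)]
    simp
  have halt : expand_m_alt (u :: us) = (u :: us).map (fun row =>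
      (row.zip ec).map (fun p => if !(row.contains "#") || p.2 then "M" else p.1)) := rfl
  -- elementwise comparison
  rw [hres, halt]
  apply List.ext_getElem
  · simp
  intro i h1 h2
  simp only [List.getElem_map, List.getElem_range, List.length_map, List.length_range] at h1 h2 ⊢
  have hi : i < (u :: us).length := by simpa using h1
  set rowi : List String := (u :: us)[i] with hrowi_def
  have hrowi_mem : rowi ∈ u :: us := List.getElem_mem hi
  have hrowi_len : n ≤ rowi.length := hnle rowi hrowi_mem
  apply List.ext_getElem
  · simp [hec_len]
    omega
  intro j hj1 hj2
  simp only [List.length_map, List.length_range] at hj1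
  have hjn : j < n := hj1
  have hjri : j < rowi.length := lt_of_lt_of_le hjn hrowi_len
  -- unfold both getElem computations
  simp only [List.getElem_map, List.getElem_range, List.getElem_zip]
  -- LHS: (mrow colj).getD i "" with colj the j-th marked column
  set colj : List String := ((u :: us).map mrow).map (fun r => r.getD j "") with hcolj_def
  have hicol : i < colj.length := by rw [hcolj_def]; simpa using hi
  have hcontains : colj.contains "#" = (u :: us).any (fun r => r.getD j "" == "#") := by
    rw [Bool.eq_iff_iff, List.contains_iff_mem, List.any_eq_true]
    rw [hcolj_def]
    constructor
    · intro hm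
      rcases List.mem_map.mp hm with ⟨r', hr', he'⟩
      rcases List.mem_map.mp hr' with ⟨r, hr, rfl⟩
      refine ⟨r, hr, ?_⟩
      have hjr : j < r.length := lt_of_lt_of_le hjn (hnle r hr)
      simpa using (mrow_getD_hash r j hjr).mp he'
    · rintro ⟨r, hr, he⟩
      have hjr : j < r.length := lt_of_lt_of_le hjn (hnle r hr)
      have hh : (mrow r).getD j "" = "#" := (mrow_getD_hash r j hjr).mpr (by simpa using he)
      exact List.mem_map.mpr ⟨mrow r, List.mem_map.mpr ⟨r, hr, rfl⟩, hh⟩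
  have hlhs : (mrow colj).getD i "" =
      if (u :: us).any (fun r => r.getD j "" == "#") then
        (if rowi.contains "#" then rowi.getD j "" else "M")
      else "M" := by
    rw [mrow_getD colj i hicol, hcontains]
    congr 1
    rw [hcolj_def]
    rw [List.getD_eq_getElem _ _ hicol]
    simp only [hcolj_def, List.getElem_map]
    rw [← hrowi_def, mrow_getD rowi j hjri]
  rw [hlhs]
  -- RHS
  have hjec : j < ec.length := by rw [hec_len]; exact hjn
  have hecj : ec[j] = !((u :: us).any (fun r => r.getD j "" == "#")) := by
    rw [← List.getD_eq_getElem _ false hjec, hec_get j hjn,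
      all_not_eq_not_any (u :: us) (fun r => r.getD j "" == "#")]
  rw [hecj, ← List.getD_eq_getElem rowi "" hjri]
  by_cases hca : ((u :: us).any fun r => r.getD j "" == "#") = true
  · by_cases hrc : rowi.contains "#" = true
    · rw [hca, hrc]; rfl
    · have hrc' : rowi.contains "#" = false := by
        revert hrc; cases rowi.contains "#" <;> simp
      rw [hca, hrc']; rfl
  · have hca' : ((u :: us).any fun r => r.getD j "" == "#") = false := by
      revert hca; cases ((u :: us).any fun r => r.getD j "" == "#") <;> simp
    rw [hca']
    cases hrc : rowi.contains "#" <;> rfl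

-- ===== VERDICT (by name: the statement is the Claim_ definition above) =====
theorem expand_m_spec : Claim_equal_expand_m := by
  intro univ _ hP
  cases univ with
  | nil => rfl
  | cons u us => exact expand_m_main u us hP
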